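-- pv_equiv track=rewrite | github.com/phillipclapham/anneal-memory | anneal_memory/continuity.py | measure_sections
-- ===== SOURCE A (Python) =====
-- def measure_sections(text: str) -> dict[str, int]:
--     """Measure character count per section.
--
--     Args:
--         text: The continuity file text.
--
--     Returns:
--         Dict mapping section name -> character count.
--     """
--     sections: dict[str, int] = {}
--     current_section = "_header"
--     current_chars = 0
--
--     for line in text.split("\n"):
--         if line.startswith("## "):
--             if current_chars > 0:
--                 sections[current_section] = current_chars
--             current_section = line[3:].strip()
--             current_chars = len(line) + 1
--         else:
--             current_chars += len(line) + 1
--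
--     if current_chars > 0:
--         sections[current_section] = current_chars
--
--     return sections
-- ===== SOURCE B (Python) =====
-- def measure_sections(text: str) -> dict[str, int]:
--     """Measure character count per section (right-to-left block accounting).
--
--     Scans the lines back to front: a running tail_chars accumulates the
--     characters of lines below the nearest header; each header line closes
--     one (name, chars) block.  The blocks, collected last-to-first, are then
--     written into the dict in forward order (duplicate names overwrite).
--     """
--     blocks: list[tuple[str, int]] = []  # last block first
--     tail_chars = 0
--     for line in reversed(text.split("\n")):
--         if line.startswith("## "):
--             blocks.append((line[3:].strip(), tail_chars + len(line) + 1))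
--             tail_chars = 0
--         else:
--             tail_chars += len(line) + 1
--     if tail_chars > 0:
--         blocks.append(("_header", tail_chars))
--     result: dict[str, int] = {}
--     for name, chars in reversed(blocks):
--         result[name] = chars
--     return result
-- ===== Notes on version B (the rewrite author's own statement) =====
-- stated objective: alternative
-- what changed: A threads a (dict, current_section, current_chars) state forward, flushing a pending count into the dict at each header; B scans the lines back-to-front accumulating a tail character count per block, collects explicit (name, chars) block pairs, and only then writes them into the dict in forward order.
import Mathlib
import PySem

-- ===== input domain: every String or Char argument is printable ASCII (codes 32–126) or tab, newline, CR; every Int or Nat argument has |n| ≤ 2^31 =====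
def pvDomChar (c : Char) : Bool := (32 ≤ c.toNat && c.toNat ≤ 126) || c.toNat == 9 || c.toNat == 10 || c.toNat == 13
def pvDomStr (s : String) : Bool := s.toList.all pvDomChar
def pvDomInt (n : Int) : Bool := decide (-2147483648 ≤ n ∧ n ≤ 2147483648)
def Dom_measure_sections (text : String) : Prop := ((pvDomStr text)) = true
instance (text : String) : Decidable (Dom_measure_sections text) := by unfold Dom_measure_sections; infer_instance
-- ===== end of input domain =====

-- B replaces A's forward scan with a pending flush by a backward scan collecting explicit blocks, then a dict-building pass (alternative decomposition, same cost).

-- ===== PORT A =====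
-- loop body of A: state = (sections, current_section, current_chars)
def msA_step (st : PySem.Dict String Int × String × Int) (line : String) :
    PySem.Dict String Int × String × Int :=
  if PySem.Str.startswith line "## " then
    ((if st.2.2 > 0 then st.1.insert st.2.1 st.2.2 else st.1),
     PySem.Str.strip (PySem.Str.slice line (some 3) none),
     PySem.Str.len line + 1)
  else
    (st.1, st.2.1, st.2.2 + PySem.Str.len line + 1)

def measure_sections (text : String) : List (String × Int) :=
  let lines := (PySem.Str.split? text "\n").getD []   -- sep "\n" ≠ "": split? never returns none
  let st := lines.foldl msA_step (PySem.Dict.empty, "_header", 0)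
  (if st.2.2 > 0 then st.1.insert st.2.1 st.2.2 else st.1).items

-- ===== PORT B =====
-- loop body of B's backward scan: state = (blocks collected last-to-first, tail_chars)
def msB_step (st : List (String × Int) × Int) (line : String) : List (String × Int) × Int :=
  if PySem.Str.startswith line "## " then
    (st.1 ++ [(PySem.Str.strip (PySem.Str.slice line (some 3) none),
               st.2 + PySem.Str.len line + 1)], 0)
  else
    (st.1, st.2 + PySem.Str.len line + 1)

def measure_sections_alt (text : String) : List (String × Int) :=
  let lines := (PySem.Str.split? text "\n").getD []   -- sep "\n" ≠ "": split? never returns none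
  let st := lines.reverse.foldl msB_step ([], 0)
  let blocks := if st.2 > 0 then st.1 ++ [("_header", st.2)] else st.1
  (blocks.reverse.foldl (fun (d : PySem.Dict String Int) p => d.insert p.1 p.2)
      PySem.Dict.empty).items

-- ===== PRECONDITION & SPEC =====
def Spec_measure_sections (text : String) (out : List (String × Int)) : Prop := out = measure_sections_alt text
instance (text : String) (out : List (String × Int)) : Decidable (Spec_measure_sections text out) := by unfold Spec_measure_sections; infer_instance

-- ===== CLAIM (what is proved, stated in full; the proofs are below) =====
def Claim_equal_measure_sections : Prop := ∀ (text : String), Dom_measure_sections text → Spec_measure_sections text (measure_sections text)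

-- ===== LEMMAS AND PROOFS =====

-- B's backward scan peels the FIRST line last
theorem msB_run_cons (l : List String) (x : String) :
    (x :: l).reverse.foldl msB_step ([], 0) = msB_step (l.reverse.foldl msB_step ([], 0)) x := by
  simp [List.foldl_append]

theorem msLen_nonneg (x : String) : 0 ≤ PySem.Str.len x := by
  simp [PySem.Str.len_eq]

theorem msB_tail_nonneg (l : List String) : 0 ≤ (l.reverse.foldl msB_step ([], 0)).2 := by
  induction l with
  | nil => simp
  | cons x t ih =>
    rw [msB_run_cons]
    generalize hst : t.reverse.foldl msB_step ([], 0) = st at ih ⊢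
    unfold msB_step
    have := msLen_nonneg x
    split
    · simp
    · simp only []
      omega

theorem len_add_one_pos (x : String) : 0 < PySem.Str.len x + 1 := by
  have := msLen_nonneg x
  omega

-- main invariant: A's flushed run from any open-block state equals B's block fold
theorem run_eq (l : List String) :
    ∀ (d : PySem.Dict String Int) (name : String) (c : Int), 0 ≤ c →
    (let st := l.foldl msA_step (d, name, c);
     if st.2.2 > 0 then st.1.insert st.2.1 st.2.2 else st.1) =
    (let st := l.reverse.foldl msB_step ([], 0);
     st.1.reverse.foldl (fun (d' : PySem.Dict String Int) p => d'.insert p.1 p.2)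
       (if c + st.2 > 0 then d.insert name (c + st.2) else d)) := by
  induction l with
  | nil => intro d name c _; simp
  | cons x t ih =>
    intro d name c hc
    rw [msB_run_cons]
    by_cases hx : PySem.Str.startswith x "## " = true
    · simp only [List.foldl_cons, msA_step, msB_step, hx, if_true]
      rw [ih _ _ _ (le_of_lt (len_add_one_pos x))]
      have ht := msB_tail_nonneg t
      have hpos : PySem.Str.len x + 1 + (t.reverse.foldl msB_step ([], 0)).2 > 0 := by
        have := len_add_one_pos x; omega
      simp only [hpos, if_pos, List.reverse_append, List.reverse_cons, List.reverse_nil,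
        List.nil_append, List.cons_append, List.foldl_cons, add_zero]
      have e : PySem.Str.len x + 1 + (t.reverse.foldl msB_step ([], 0)).2 =
          (t.reverse.foldl msB_step ([], 0)).2 + PySem.Str.len x + 1 := by ring
      rw [e]
    · simp only [List.foldl_cons, msA_step, msB_step, hx, if_false, Bool.false_eq_true]
      rw [ih _ _ _ (by have := msLen_nonneg x; omega)]
      have e : c + PySem.Str.len x + 1 + (t.reverse.foldl msB_step ([], 0)).2 =
          c + ((t.reverse.foldl msB_step ([], 0)).2 + PySem.Str.len x + 1) := by ring
      simp only []
      rw [e]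

-- ===== VERDICT (by name: the statement is the Claim_ definition above) =====
theorem measure_sections_spec : Claim_equal_measure_sections := by
  intro text _
  unfold Spec_measure_sections measure_sections measure_sections_alt
  simp only []
  set l := (PySem.Str.split? text "\n").getD [] with hl
  have h := run_eq l PySem.Dict.empty "_header" 0 le_rfl
  simp only [] at h
  rw [h]
  congr 1
  by_cases h2 : (l.reverse.foldl msB_step ([], 0)).2 > 0
  · rw [if_pos h2, if_pos (by omega : (0:Int) + (l.reverse.foldl msB_step ([], 0)).2 > 0),
      List.reverse_append, zero_add]
    rfl
  · rw [if_neg h2, if_neg (by omega : ¬ ((0:Int) + (l.reverse.foldl msB_step ([], 0)).2 > 0))]
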